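-- pv_equiv track=rewrite | github.com/piotrowskv/music_generation | models/models/lstm/train.py | get_hot_sequences
-- ===== SOURCE A (Python) =====
-- SEQUENCE_LENGTH = 100
--
-- def get_hot_sequences(raw_input):
--     notes_sequences = []
--     lengths_sequences = []
--     notes_predictions = []
--     lengths_predictions = []
--
--     for i in range(SEQUENCE_LENGTH, len(raw_input)):
--         notes_sequence = []
--         lengths_sequence = []
--
--         for index in range(i - SEQUENCE_LENGTH, i):
--             notes_sequence.append(raw_input[index][1])
--             lengths_sequence.append(raw_input[index][0])
--         notes_sequences.append(notes_sequence)
--         lengths_sequences.append(lengths_sequence)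
--
--         notes_predictions.append(raw_input[i][1])
--         lengths_predictions.append(raw_input[i][0])
--
--     return notes_sequences, lengths_sequences, notes_predictions, lengths_predictions
-- ===== SOURCE B (Python) =====
-- SEQUENCE_LENGTH = 100
--
-- def get_hot_sequences(raw_input):
--     # Single pass with a rolling window: instead of rebuilding each window from
--     # indices, maintain the last SEQUENCE_LENGTH elements incrementally.
--     notes_sequences = []
--     lengths_sequences = []
--     notes_predictions = []
--     lengths_predictions = []
--     window_notes = []
--     window_lengths = []
--     for length, note in raw_input:
--         if len(window_notes) == SEQUENCE_LENGTH:
--             notes_sequences.append(window_notes.copy())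
--             lengths_sequences.append(window_lengths.copy())
--             notes_predictions.append(note)
--             lengths_predictions.append(length)
--             window_notes.pop(0)
--             window_lengths.pop(0)
--         window_notes.append(note)
--         window_lengths.append(length)
--     return notes_sequences, lengths_sequences, notes_predictions, lengths_predictions
-- ===== Notes on version B (the rewrite author's own statement) =====
-- stated objective: alternative
-- what changed: Replaces the index-driven nested loops (rebuilding each window element-by-element from range indices) with a single pass over the data itself that maintains a rolling window of the last SEQUENCE_LENGTH elements, emitting a snapshot and prediction whenever the window is full, then sliding it by pop(0)/append.
import Mathlib
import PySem

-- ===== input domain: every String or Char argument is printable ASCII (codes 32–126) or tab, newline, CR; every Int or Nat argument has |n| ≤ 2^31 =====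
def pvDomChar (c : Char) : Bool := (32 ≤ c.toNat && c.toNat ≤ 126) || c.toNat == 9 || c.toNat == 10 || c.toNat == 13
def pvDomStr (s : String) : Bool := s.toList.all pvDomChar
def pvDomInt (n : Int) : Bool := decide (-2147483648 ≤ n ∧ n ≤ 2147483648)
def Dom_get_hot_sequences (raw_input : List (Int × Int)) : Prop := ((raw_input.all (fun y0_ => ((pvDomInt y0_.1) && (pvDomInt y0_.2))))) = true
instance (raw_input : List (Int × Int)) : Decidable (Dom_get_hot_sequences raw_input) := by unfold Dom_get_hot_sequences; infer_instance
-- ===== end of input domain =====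

-- B replaces A's index-driven nested window rebuild with a single pass maintaining a
-- rolling window of the last 100 elements (objective: alternative); returns proved identical.

-- ===== PORT A =====
-- SEQUENCE_LENGTH = 100
def pvSEQ : Int := 100

-- literal port of A: outer loop over range(100, len), inner loop appending element by element
def get_hot_sequences (raw_input : List (Int × Int)) : List (List Int) × List (List Int) × List Int × List Int :=
  (PySem.List.pyRange pvSEQ (raw_input.length : Int) 1).foldl
    (fun (s : List (List Int) × List (List Int) × List Int × List Int) i =>
      let inner := (PySem.List.pyRange (i - pvSEQ) i 1).foldl
        (fun (p : List Int × List Int) idx =>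
          (p.1 ++ [(PySem.List.pyGetD raw_input idx (0, 0)).2],
           p.2 ++ [(PySem.List.pyGetD raw_input idx (0, 0)).1])) ([], [])
      (s.1 ++ [inner.1],
       s.2.1 ++ [inner.2],
       s.2.2.1 ++ [(PySem.List.pyGetD raw_input i (0, 0)).2],
       s.2.2.2 ++ [(PySem.List.pyGetD raw_input i (0, 0)).1]))
    ([], [], [], [])

-- ===== PORT B =====
-- loop state of B: the four output lists plus the two rolling windows
structure BState where
  ns : List (List Int)
  ls : List (List Int)
  np : List Int
  lp : List Int
  wn : List Int
  wl : List Int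
deriving DecidableEq, Repr

-- one iteration of B's loop body ('for length, note in raw_input'); x = (length, note).
-- 'window.pop(0)' on a list of length 100 discards the head: exactly List.tail.
def pvStep (s : BState) (x : Int × Int) : BState :=
  let s1 := if s.wn.length = 100 then
      { ns := s.ns ++ [s.wn], ls := s.ls ++ [s.wl],
        np := s.np ++ [x.2], lp := s.lp ++ [x.1],
        wn := s.wn.tail, wl := s.wl.tail }
    else s
  { s1 with wn := s1.wn ++ [x.2], wl := s1.wl ++ [x.1] }

-- literal port of B: one fold over the data with a rolling window
def get_hot_sequences_alt (raw_input : List (Int × Int)) : List (List Int) × List (List Int) × List Int × List Int :=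
  let st := raw_input.foldl pvStep ⟨[], [], [], [], [], []⟩
  (st.ns, st.ls, st.np, st.lp)

-- ===== PRECONDITION & SPEC =====
def Spec_get_hot_sequences (raw_input : List (Int × Int)) (out : List (List Int) × List (List Int) × List Int × List Int) : Prop := out = get_hot_sequences_alt raw_input
instance (raw_input : List (Int × Int)) (out : List (List Int) × List (List Int) × List Int × List Int) : Decidable (Spec_get_hot_sequences raw_input out) := by unfold Spec_get_hot_sequences; infer_instance

-- ===== CLAIM (what is proved, stated in full; the proofs are below) =====
def Claim_equal_get_hot_sequences : Prop := ∀ (raw_input : List (Int × Int)), Dom_get_hot_sequences raw_input → Spec_get_hot_sequences raw_input (get_hot_sequences raw_input)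

-- ===== LEMMAS AND PROOFS =====

-- canonical closed form both programs are proved equal to
def pvS (p : List (Int × Int)) : BState :=
  let notes := p.map Prod.snd
  let lens := p.map Prod.fst
  let n := p.length
  { ns := (List.range (n - 100)).map fun k => (notes.drop k).take 100
  , ls := (List.range (n - 100)).map fun k => (lens.drop k).take 100
  , np := notes.drop 100
  , lp := lens.drop 100
  , wn := notes.drop (n - 100)
  , wl := lens.drop (n - 100) }

-- pyGetD of a column list agrees with projecting pyGetD of the pair list (in-range index)
theorem pvGetD_snd (raw : List (Int × Int)) (i : Int) (h0 : 0 ≤ i) (h1 : i < raw.length) :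
    (PySem.List.pyGetD raw i (0, 0)).2 = PySem.List.pyGetD (raw.map (fun x => x.2)) i 0 := by
  rw [PySem.List.pyGetD_eq_getElem raw _ h0 h1,
      PySem.List.pyGetD_eq_getElem _ _ h0 (by simpa using h1)]
  simp

theorem pvGetD_fst (raw : List (Int × Int)) (i : Int) (h0 : 0 ≤ i) (h1 : i < raw.length) :
    (PySem.List.pyGetD raw i (0, 0)).1 = PySem.List.pyGetD (raw.map (fun x => x.1)) i 0 := by
  rw [PySem.List.pyGetD_eq_getElem raw _ h0 h1,
      PySem.List.pyGetD_eq_getElem _ _ h0 (by simpa using h1)]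
  simp

-- a map of in-range pyGetD over a range is a slice of the list
theorem pvMap_getD_eq_slice {α : Type} [Inhabited α] (xs : List α) (a b : Int) (d : α)
    (h0 : 0 ≤ a) (hab : a ≤ b) (hb : b ≤ xs.length) :
    (PySem.List.pyRange a b 1).map (fun idx => PySem.List.pyGetD xs idx d)
      = PySem.List.slice xs (some a) (some b) := by
  rw [PySem.List.slice_of_nonneg xs h0 (by omega) (by omega) hb, PySem.List.pyRange_one]
  apply List.ext_getElem
  · simp; omega
  · intro k hk1 hk2
    have hk : k < (b - a).toNat := by simpa using hk1
    simp only [List.getElem_map, List.getElem_range, List.getElem_take, List.getElem_drop]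
    rw [PySem.List.pyGetD_eq_getElem xs _ (by omega) (by omega)]
    congr 1
    omega

-- A's inner accumulation loop equals the pair of slices of the column lists
theorem pvInner_eq (raw : List (Int × Int)) (i : Int) (h0 : pvSEQ ≤ i) (h1 : i < raw.length) :
    (PySem.List.pyRange (i - pvSEQ) i 1).foldl
        (fun (p : List Int × List Int) idx =>
          (p.1 ++ [(PySem.List.pyGetD raw idx (0, 0)).2],
           p.2 ++ [(PySem.List.pyGetD raw idx (0, 0)).1])) ([], [])
      = (PySem.List.slice (raw.map (fun x => x.2)) (some (i - pvSEQ)) (some i),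
         PySem.List.slice (raw.map (fun x => x.1)) (some (i - pvSEQ)) (some i)) := by
  have hseq : pvSEQ = (100 : Int) := rfl
  rw [PySem.List.foldl_prod_mk
        (fun (acc : List Int) idx => acc ++ [(PySem.List.pyGetD raw idx (0, 0)).2])
        (fun (acc : List Int) idx => acc ++ [(PySem.List.pyGetD raw idx (0, 0)).1]),
      PySem.List.foldl_append_singleton_eq_map, PySem.List.foldl_append_singleton_eq_map]
  have hnn : (0 : Int) ≤ i - pvSEQ := by omega
  have hle : i - pvSEQ ≤ i := by rw [hseq]; omega
  have hi : i ≤ (raw.length : Int) := le_of_lt h1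
  rw [show ((PySem.List.pyRange (i - pvSEQ) i 1).map fun idx => (PySem.List.pyGetD raw idx (0, 0)).2)
        = (PySem.List.pyRange (i - pvSEQ) i 1).map
            (fun idx => PySem.List.pyGetD (raw.map (fun x => x.2)) idx 0) from
      List.map_congr_left (fun idx hidx => by
        rw [PySem.List.mem_pyRange_one] at hidx
        exact pvGetD_snd raw idx (by omega) (by omega)),
    show ((PySem.List.pyRange (i - pvSEQ) i 1).map fun idx => (PySem.List.pyGetD raw idx (0, 0)).1)
        = (PySem.List.pyRange (i - pvSEQ) i 1).map
            (fun idx => PySem.List.pyGetD (raw.map (fun x => x.1)) idx 0) from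
      List.map_congr_left (fun idx hidx => by
        rw [PySem.List.mem_pyRange_one] at hidx
        exact pvGetD_fst raw idx (by omega) (by omega))]
  rw [pvMap_getD_eq_slice _ _ _ _ hnn hle (by simpa using hi),
      pvMap_getD_eq_slice _ _ _ _ hnn hle (by simpa using hi)]
  simp

-- a map of in-range pyGetD over range(100, len) is drop 100
theorem pvGetMap (raw : List (Int × Int)) (f : Int × Int → Int) :
    (PySem.List.pyRange 100 (raw.length : Int) 1).map (fun i => PySem.List.pyGetD (raw.map f) i 0)
      = (raw.map f).drop 100 := by
  by_cases h : raw.length ≤ 100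
  · rw [PySem.List.pyRange_one]
    have h0 : ((raw.length : Int) - 100).toNat = 0 := by omega
    rw [h0]
    simp [List.drop_eq_nil_of_le, h]
  · push_neg at h
    rw [pvMap_getD_eq_slice (raw.map f) 100 (raw.length : Int) 0 (by norm_num)
          (by exact_mod_cast h.le) (by simp),
        PySem.List.slice_of_nonneg (raw.map f) (a := 100) (b := (raw.length : Int)) (by norm_num)
          (by positivity) (by simpa using h.le) (by simp),
        List.take_of_length_le (by simp)]
    congr 1

-- a map of the window slices over range(100, len) is the closed form list of windows
theorem pvSliceMap (raw : List (Int × Int)) (f : Int × Int → Int) :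
    (PySem.List.pyRange 100 (raw.length : Int) 1).map
        (fun i => PySem.List.slice (raw.map f) (some (i - 100)) (some i))
      = (List.range (raw.length - 100)).map (fun k => ((raw.map f).drop k).take 100) := by
  rw [PySem.List.pyRange_one]
  have h0 : ((raw.length : Int) - 100).toNat = raw.length - 100 := by omega
  rw [h0, List.map_map]
  apply List.map_congr_left
  intro k hk
  rw [List.mem_range] at hk
  simp only [Function.comp_apply]
  rw [show (100 : Int) + k - 100 = (k : Int) by ring,
      PySem.List.slice_of_nonneg (raw.map f) (a := (k : Int)) (b := (100 : Int) + k) (by positivity)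
        (by positivity) (by rw [List.length_map]; push_cast; omega)
        (by rw [List.length_map]; push_cast; omega),
      show ((k : Int)).toNat = k from by omega,
      show ((100 : Int) + (k : Nat)).toNat - k = 100 from by omega]

-- A equals the closed form
theorem pvA_eq (raw : List (Int × Int)) :
    get_hot_sequences raw = ((pvS raw).ns, (pvS raw).ls, (pvS raw).np, (pvS raw).lp) := by
  have step1 : get_hot_sequences raw
      = (PySem.List.pyRange pvSEQ (raw.length : Int) 1).foldl
          (fun (s : List (List Int) × List (List Int) × List Int × List Int) i =>
            (s.1 ++ [PySem.List.slice (raw.map (fun x => x.2)) (some (i - pvSEQ)) (some i)],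
             s.2.1 ++ [PySem.List.slice (raw.map (fun x => x.1)) (some (i - pvSEQ)) (some i)],
             s.2.2.1 ++ [PySem.List.pyGetD (raw.map (fun x => x.2)) i 0],
             s.2.2.2 ++ [PySem.List.pyGetD (raw.map (fun x => x.1)) i 0]))
          ([], [], [], []) := by
    unfold get_hot_sequences
    apply PySem.List.foldl_congr_mem
    intro acc i hi
    rw [PySem.List.mem_pyRange_one] at hi
    have h1 : i < (raw.length : Int) := hi.2
    have hseq : pvSEQ = (100 : Int) := rfl
    rw [pvInner_eq raw i hi.1 h1,
        pvGetD_snd raw i (by omega) h1,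
        pvGetD_fst raw i (by omega) h1]
  rw [step1,
      PySem.List.foldl_prod_mk
        (f := fun (a : List (List Int)) i => a ++ [PySem.List.slice (raw.map (fun x => x.2)) (some (i - pvSEQ)) (some i)])
        (g := fun (s : List (List Int) × List Int × List Int) i =>
          (s.1 ++ [PySem.List.slice (raw.map (fun x => x.1)) (some (i - pvSEQ)) (some i)],
           s.2.1 ++ [PySem.List.pyGetD (raw.map (fun x => x.2)) i 0],
           s.2.2 ++ [PySem.List.pyGetD (raw.map (fun x => x.1)) i 0])),
      PySem.List.foldl_prod_mk
        (f := fun (a : List (List Int)) i => a ++ [PySem.List.slice (raw.map (fun x => x.1)) (some (i - pvSEQ)) (some i)])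
        (g := fun (s : List Int × List Int) i =>
          (s.1 ++ [PySem.List.pyGetD (raw.map (fun x => x.2)) i 0],
           s.2 ++ [PySem.List.pyGetD (raw.map (fun x => x.1)) i 0])),
      PySem.List.foldl_prod_mk
        (f := fun (a : List Int) i => a ++ [PySem.List.pyGetD (raw.map (fun x => x.2)) i 0])
        (g := fun (a : List Int) i => a ++ [PySem.List.pyGetD (raw.map (fun x => x.1)) i 0])]
  simp only [PySem.List.foldl_append_singleton_eq_map, List.nil_append]
  simp only [pvS]
  exact Prod.ext (pvSliceMap raw _) (Prod.ext (pvSliceMap raw _)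
    (Prod.ext (pvGetMap raw _) (pvGetMap raw _)))

-- B's loop body preserves the closed-form invariant
theorem pvStep_S (p : List (Int × Int)) (x : Int × Int) :
    pvStep (pvS p) x = pvS (p ++ [x]) := by
  simp only [pvStep, pvS]
  split_ifs with hc
  · have hn : 100 ≤ p.length := by simp at hc; omega
    simp only [BState.mk.injEq]
    have hL : (p ++ [x]).length - 100 = (p.length - 100) + 1 := by simp <;> omega
    refine ⟨?_, ?_, ?_, ?_, ?_, ?_⟩
    · rw [hL, List.range_succ, List.map_append]
      congr 1
      · apply List.map_congr_left
        intro k hk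
        rw [List.mem_range] at hk
        rw [List.map_append, List.drop_append_of_le_length (by simp <;> omega),
            List.take_append_of_le_length (by simp <;> omega)]
      · simp only [List.map_append, List.map_cons, List.map_nil]
        rw [List.drop_append_of_le_length (by simp <;> omega),
            List.take_append_of_le_length (by simp <;> omega),
            List.take_of_length_le (by simp <;> omega)]
    · rw [hL, List.range_succ, List.map_append]
      congr 1
      · apply List.map_congr_left
        intro k hk
        rw [List.mem_range] at hk
        rw [List.map_append, List.drop_append_of_le_length (by simp <;> omega),
            List.take_append_of_le_length (by simp <;> omega)]
      · simp only [List.map_append, List.map_cons, List.map_nil]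
        rw [List.drop_append_of_le_length (by simp <;> omega),
            List.take_append_of_le_length (by simp <;> omega),
            List.take_of_length_le (by simp <;> omega)]
    · simp only [List.map_append, List.map_cons, List.map_nil]
      rw [List.drop_append_of_le_length (by simp <;> omega)]
    · simp only [List.map_append, List.map_cons, List.map_nil]
      rw [List.drop_append_of_le_length (by simp <;> omega)]
    · simp only [List.map_append, List.map_cons, List.map_nil]
      rw [List.tail_drop, List.drop_append_of_le_length (by simp <;> omega), hL]
    · simp only [List.map_append, List.map_cons, List.map_nil]
      rw [List.tail_drop, List.drop_append_of_le_length (by simp <;> omega), hL]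
  · have hn : p.length < 100 := by simp at hc; omega
    have h0 : p.length - 100 = 0 := by omega
    have h1 : (p ++ [x]).length - 100 = 0 := by simp <;> omega
    simp only [BState.mk.injEq]
    refine ⟨?_, ?_, ?_, ?_, ?_, ?_⟩
    · rw [h0, h1]
      simp
    · rw [h0, h1]
      simp
    · rw [List.drop_eq_nil_of_le (by simp <;> omega), List.drop_eq_nil_of_le (by simp <;> omega)]
    · rw [List.drop_eq_nil_of_le (by simp <;> omega), List.drop_eq_nil_of_le (by simp <;> omega)]
    · rw [h0, h1]
      simp
    · rw [h0, h1]
      simp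

theorem pvB_inv (p : List (Int × Int)) :
    p.foldl pvStep ⟨[], [], [], [], [], []⟩ = pvS p := by
  induction p using List.reverseRecOn with
  | nil => rfl
  | append_singleton p x ih =>
      rw [List.foldl_append, ih, List.foldl_cons, List.foldl_nil, pvStep_S]

-- ===== VERDICT (by name: the statement is the Claim_ definition above) =====
theorem get_hot_sequences_spec : Claim_equal_get_hot_sequences := by
  intro raw _
  unfold Spec_get_hot_sequences get_hot_sequences_alt
  rw [pvA_eq]
  simp only [pvB_inv]
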